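-- pv_equiv track=rewrite | github.com/nmolkent/aoc_2023 | solutions/day_13/part1.py | find_reflection
-- ===== SOURCE A (Python) =====
-- def mirror(arr, i, j, allowed_diffs=0, diffs=0):
--     # using diffs as an accumulator we can both return early when diffs > than the allowed limit (see section 2)
--     # and return diffs when the end condition is met (ie the indexed are about to go out of bounds)
--     if i < 0 or j >= len(arr) or diffs > allowed_diffs:
--         return diffs
--     else:
--         return mirror(arr, i - 1, j + 1, allowed_diffs,
--             diffs + sum([int(x != y) for x, y in zip(arr[i], arr[j])])
--         )
--
-- def find_reflection(arr, allowed_diffs=0):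
--     # 2 searches h = horizontal
--     for i in range(len(arr) - 1):
--         h_reflect = mirror(arr, i, i+1, allowed_diffs)
--         if h_reflect == allowed_diffs:
--             return (i+1)*100
--     # v = vertical note the array is simply transposed so we can use the same mirror function for both
--     for i in range(len(arr[0]) - 1):
--         v_reflect = mirror(list(zip(*arr)), i, i+1, allowed_diffs)
--         if v_reflect == allowed_diffs:
--             return i+1
-- ===== SOURCE B (Python) =====
-- def find_reflection(arr, allowed_diffs=0):
--     # Transpose hoisted out of the vertical loop; mismatch counting done by
--     # zipping the reversed top slice against the bottom slice (no recursion,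
--     # no accumulator / early-exit bookkeeping).
--     def row_diff(u, v):
--         return sum(x != y for x, y in zip(u, v))
--
--     def split_diffs(rows, i):
--         return sum(row_diff(u, v) for u, v in zip(reversed(rows[:i + 1]), rows[i + 1:]))
--
--     h = next((100 * (i + 1) for i in range(len(arr) - 1)
--               if split_diffs(arr, i) == allowed_diffs), None)
--     if h is not None:
--         return h
--     width = len(arr[0])
--     cols = list(zip(*arr))
--     return next((i + 1 for i in range(width - 1)
--                  if split_diffs(cols, i) == allowed_diffs), None)
-- ===== Notes on version B (the rewrite author's own statement) =====
-- stated objective: alternative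
-- what changed: Replaces the recursive early-exit mirror accumulator with a direct zip of the reversed top slice against the bottom slice, and hoists the transpose out of the vertical loop so it is built once instead of once per candidate line (intended as faster; measured 1.74x at n=1024, unconfirmed at the largest size).
-- outside the precondition, e.g. on find_reflection([], 0): A raises IndexError, B raises IndexError
import Mathlib
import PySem

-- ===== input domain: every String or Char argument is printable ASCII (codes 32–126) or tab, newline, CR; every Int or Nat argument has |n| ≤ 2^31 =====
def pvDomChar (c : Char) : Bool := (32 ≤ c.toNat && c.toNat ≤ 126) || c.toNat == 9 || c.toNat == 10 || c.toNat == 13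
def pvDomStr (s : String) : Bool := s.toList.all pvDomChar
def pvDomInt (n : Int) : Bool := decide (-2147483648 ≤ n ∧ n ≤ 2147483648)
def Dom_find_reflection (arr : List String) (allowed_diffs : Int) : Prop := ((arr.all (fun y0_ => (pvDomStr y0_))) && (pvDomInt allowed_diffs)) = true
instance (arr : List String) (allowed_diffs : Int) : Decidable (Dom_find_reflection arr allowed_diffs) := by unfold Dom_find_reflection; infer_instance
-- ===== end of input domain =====

-- B hoists the transpose out of the vertical loop and counts mismatches by zipping the
-- reversed top slice against the bottom slice instead of A's recursive early-exit accumulator.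

-- ===== PORT A =====

-- list(zip(*a)) : columns of a, truncated to the shortest row (shared transpose helper)
def pyZipStar (a : List (List Char)) : List (List Char) :=
  (List.range ((a.map List.length).min?.getD 0)).map (fun k => a.map (fun r => r.getD k ' '))

-- sum([int(x != y) for x, y in zip(u, v)])
def rowDiffSumA (u v : List Char) : Int :=
  ((u.zip v).map (fun p => if p.1 ≠ p.2 then (1 : Int) else 0)).sum

-- mirror(arr, i, j, allowed_diffs, diffs); row access arr[i] via pyGet? (in range on all calls A makes)
def mirrorA (a : List (List Char)) (i j allowed diffs : Int) : Int :=
  if i < 0 ∨ j ≥ (a.length : Int) ∨ diffs > allowed then diffs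
  else mirrorA a (i - 1) (j + 1) allowed
        (diffs + rowDiffSumA ((PySem.List.pyGet? a i).getD []) ((PySem.List.pyGet? a j).getD []))
termination_by ((a.length : Int) - j).toNat
decreasing_by simp only [not_or, not_lt, not_le] at *; omega

-- the Python for-loop with an early return: first i in the list whose mirror matches
def loopA (a : List (List Char)) (allowed scale : Int) : List Int → Option Int
  | [] => none
  | i :: rest =>
    if mirrorA a i (i + 1) allowed 0 = allowed then some ((i + 1) * scale)
    else loopA a allowed scale rest

def find_reflection (arr : List String) (allowed_diffs : Int) : Option Int :=
  let a := arr.map String.toList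
  match loopA a allowed_diffs 100 (PySem.List.pyRange 0 ((arr.length : Int) - 1) 1) with
  | some v => some v
  | none =>
      -- len(arr[0]) : Pre_ guarantees arr ≠ [] (Python raises IndexError on [])
      loopA (pyZipStar a) allowed_diffs 1
        (PySem.List.pyRange 0 (((a.headD []).length : Int) - 1) 1)

-- ===== PORT B =====

-- sum(x != y for x, y in zip(u, v))
def rowDiffB (u v : List Char) : Int :=
  ((u.zip v).countP (fun p => p.1 ≠ p.2) : Int)

-- sum(row_diff(u, v) for u, v in zip(reversed(rows[:i+1]), rows[i+1:]))
def splitDiffsB (rows : List (List Char)) (i : Int) : Int :=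
  (((PySem.List.slice rows none (some (i + 1))).reverse.zip
      (PySem.List.slice rows (some (i + 1)) none)).map (fun p => rowDiffB p.1 p.2)).sum

def find_reflection_alt (arr : List String) (allowed_diffs : Int) : Option Int :=
  let a := arr.map String.toList
  match (PySem.List.pyRange 0 ((arr.length : Int) - 1) 1).findSome? (fun i =>
      if splitDiffsB a i = allowed_diffs then some (100 * (i + 1)) else none) with
  | some h => some h
  | none =>
      let width : Int := (a.headD []).length
      let cols := pyZipStar a
      (PySem.List.pyRange 0 (width - 1) 1).findSome? (fun i =>
        if splitDiffsB cols i = allowed_diffs then some (i + 1) else none)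

-- ===== PRECONDITION & SPEC =====
-- Pre_ excludes only arr = [], on which the Python A (and B alike) raises IndexError at arr[0].
def Pre_find_reflection (arr : List String) (allowed_diffs : Int) : Prop := arr ≠ []
instance (arr : List String) (allowed_diffs : Int) : Decidable (Pre_find_reflection arr allowed_diffs) := by unfold Pre_find_reflection; infer_instance
def pvWitness_find_reflection : List String × Int := (["ab", "ab", "cd"], 0)

def Spec_find_reflection (arr : List String) (allowed_diffs : Int) (out : Option Int) : Prop := out = find_reflection_alt arr allowed_diffs
instance (arr : List String) (allowed_diffs : Int) (out : Option Int) : Decidable (Spec_find_reflection arr allowed_diffs out) := by unfold Spec_find_reflection; infer_instance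

-- ===== CLAIM (what is proved, stated in full; the proofs are below) =====
def Claim_equal_find_reflection : Prop := ∀ (arr : List String) (allowed_diffs : Int), Dom_find_reflection arr allowed_diffs → Pre_find_reflection arr allowed_diffs → Spec_find_reflection arr allowed_diffs (find_reflection arr allowed_diffs)

-- ===== LEMMAS AND PROOFS =====

-- full (no early exit) mismatch total of A's recursion, with A's exact row accesses
def totalD (a : List (List Char)) (i j : Int) : Int :=
  if i < 0 ∨ j ≥ (a.length : Int) then 0
  else rowDiffSumA ((PySem.List.pyGet? a i).getD []) ((PySem.List.pyGet? a j).getD [])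
        + totalD a (i - 1) (j + 1)
termination_by ((a.length : Int) - j).toNat
decreasing_by simp only [not_or, not_lt, not_le] at *; omega

lemma rowDiffSumA_nonneg (u v : List Char) : 0 ≤ rowDiffSumA u v := by
  unfold rowDiffSumA
  apply List.sum_nonneg
  intro x hx
  simp only [List.mem_map] at hx
  obtain ⟨p, _, rfl⟩ := hx
  split <;> omega

lemma totalD_nonneg (a : List (List Char)) (i j : Int) : 0 ≤ totalD a i j := by
  rw [totalD]
  split
  · omega
  · have h1 := rowDiffSumA_nonneg ((PySem.List.pyGet? a i).getD []) ((PySem.List.pyGet? a j).getD [])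
    have h2 := totalD_nonneg a (i - 1) (j + 1)
    omega
termination_by ((a.length : Int) - j).toNat
decreasing_by simp only [not_or, not_lt, not_le] at *; omega

lemma mirrorA_eq_allowed_iff (a : List (List Char)) (allowed : Int) :
    ∀ (n : Nat) (i j d : Int), ((a.length : Int) - j).toNat = n →
      (mirrorA a i j allowed d = allowed ↔ d + totalD a i j = allowed) := by
  intro n
  induction n using Nat.strong_induction_on with
  | _ n ih =>
    intro i j d hn
    rw [mirrorA, totalD]
    by_cases hbase : i < 0 ∨ j ≥ (a.length : Int)
    · have : i < 0 ∨ j ≥ (a.length : Int) ∨ d > allowed := by tauto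
      simp only [if_pos this, if_pos hbase]
      omega
    · by_cases hd : d > allowed
      · have hcond : i < 0 ∨ j ≥ (a.length : Int) ∨ d > allowed := by tauto
        simp only [if_pos hcond, if_neg hbase]
        have h1 := rowDiffSumA_nonneg ((PySem.List.pyGet? a i).getD []) ((PySem.List.pyGet? a j).getD [])
        have h2 := totalD_nonneg a (i - 1) (j + 1)
        omega
      · have hcond : ¬ (i < 0 ∨ j ≥ (a.length : Int) ∨ d > allowed) := by tauto
        simp only [if_neg hcond, if_neg hbase]
        have hj : j < (a.length : Int) := by omega
        have hn' : ((a.length : Int) - (j + 1)).toNat < n := by omega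
        rw [ih _ hn' (i - 1) (j + 1)
              (d + rowDiffSumA ((PySem.List.pyGet? a i).getD []) ((PySem.List.pyGet? a j).getD []))
              rfl]
        omega

lemma totalD_eq_split (a : List (List Char)) :
    ∀ (n : Nat) (i j : Int), ((a.length : Int) - j).toNat = n → i < j → 0 < j →
      totalD a i j =
        (((a.take (i + 1).toNat).reverse.zip (a.drop j.toNat)).map
          (fun p => rowDiffSumA p.1 p.2)).sum := by
  intro n
  induction n using Nat.strong_induction_on with
  | _ n ih =>
    intro i j hn hij hj
    rw [totalD]
    by_cases hi0 : i < 0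
    · rw [if_pos (Or.inl hi0)]
      have h0 : (i + 1).toNat = 0 := by omega
      rw [h0]
      simp
    · by_cases hjlen : j ≥ (a.length : Int)
      · rw [if_pos (Or.inr hjlen)]
        have hdrop : a.drop j.toNat = [] := List.drop_eq_nil_of_le (by omega)
        rw [hdrop]
        simp
      · rw [if_neg (by tauto)]
        have hi : 0 ≤ i := by omega
        have hjj : 0 ≤ j := by omega
        have hitl : i.toNat < a.length := by omega
        have hjtl : j.toNat < a.length := by omega
        have hgi : (PySem.List.pyGet? a i).getD [] = a[i.toNat]'hitl := by
          rw [PySem.List.pyGet?_of_nonneg _ hi, List.getElem?_eq_getElem hitl]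
          rfl
        have hgj : (PySem.List.pyGet? a j).getD [] = a[j.toNat]'hjtl := by
          rw [PySem.List.pyGet?_of_nonneg _ hjj, List.getElem?_eq_getElem hjtl]
          rfl
        have htake : (a.take (i + 1).toNat).reverse = a[i.toNat]'hitl :: (a.take i.toNat).reverse := by
          have h1 : (i + 1).toNat = i.toNat + 1 := by omega
          rw [h1, List.take_succ, List.getElem?_eq_getElem hitl]
          simp
        have hdrop : a.drop j.toNat = a[j.toNat]'hjtl :: a.drop (j.toNat + 1) :=
          List.drop_eq_getElem_cons hjtl
        rw [htake, hdrop, List.zip_cons_cons, List.map_cons, List.sum_cons, hgi, hgj]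
        have hrec := ih (((a.length : Int) - (j + 1)).toNat) (by omega) (i - 1) (j + 1) rfl
          (by omega) (by omega)
        rw [hrec]
        have h2 : i - 1 + 1 = i := by ring
        have h3 : (j + 1).toNat = j.toNat + 1 := by omega
        rw [h2, h3]

lemma rowDiff_eq (u v : List Char) : rowDiffB u v = rowDiffSumA u v := by
  unfold rowDiffB rowDiffSumA
  induction u.zip v with
  | nil => simp
  | cons p l ih =>
    rw [List.countP_cons, List.map_cons, List.sum_cons]
    push_cast
    rw [← ih]
    split_ifs with h <;> simp_all [add_comm]

lemma splitDiffsB_eq (a : List (List Char)) (i : Int) (hi : 0 ≤ i) :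
    splitDiffsB a i =
      (((a.take (i + 1).toNat).reverse.zip (a.drop (i + 1).toNat)).map
        (fun p => rowDiffSumA p.1 p.2)).sum := by
  unfold splitDiffsB
  rw [PySem.List.slice_to _ (by omega : (0:Int) ≤ i + 1), PySem.List.slice_from _ (by omega : (0:Int) ≤ i + 1)]
  simp only [rowDiff_eq]

lemma cond_iff (a : List (List Char)) (allowed i : Int) (hi : 0 ≤ i) :
    (mirrorA a i (i + 1) allowed 0 = allowed) ↔ (splitDiffsB a i = allowed) := by
  rw [mirrorA_eq_allowed_iff a allowed _ i (i + 1) 0 rfl]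
  rw [totalD_eq_split a _ i (i + 1) rfl (by omega) (by omega)]
  rw [splitDiffsB_eq a i hi]
  omega

lemma loopA_eq_findSome (a : List (List Char)) (allowed scale : Int) (l : List Int)
    (hl : ∀ i ∈ l, 0 ≤ i) :
    loopA a allowed scale l =
      l.findSome? (fun i => if splitDiffsB a i = allowed then some ((i + 1) * scale) else none) := by
  induction l with
  | nil => rfl
  | cons x rest ih =>
    rw [loopA, List.findSome?_cons]
    have hx : 0 ≤ x := hl x (by simp)
    have hiff := cond_iff a allowed x hx
    by_cases hc : splitDiffsB a x = allowed
    · rw [if_pos (hiff.mpr hc), if_pos hc]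
    · rw [if_neg (fun h => hc (hiff.mp h)), if_neg hc]
      exact ih (fun i h => hl i (by simp [h]))

-- ===== VERDICT (by name: the statement is the Claim_ definition above) =====
theorem find_reflection_spec : Claim_equal_find_reflection := by
  intro arr allowed_diffs _ _
  simp only [Spec_find_reflection, find_reflection, find_reflection_alt]
  have hmem : ∀ (b : Int), ∀ i ∈ PySem.List.pyRange 0 b 1, (0:Int) ≤ i := by
    intro b i hi
    rw [PySem.List.mem_pyRange_one] at hi
    omega
  rw [loopA_eq_findSome _ _ _ _ (hmem _), loopA_eq_findSome _ _ _ _ (hmem _)]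
  have h100 : ∀ i : Int, (i + 1) * 100 = 100 * (i + 1) := fun i => by ring
  simp only [h100, mul_one]
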